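-- pv_equiv track=rewrite | github.com/general0716/software-carpentry | Lazor Project/lazors3.py | generate_full_grid
-- ===== SOURCE A (Python) =====
-- def generate_full_grid(grid_origin):
--     """
--     Generate the full grid from the original small grid.
--     For a grid of size rows x cols, the full grid has dimensions (2*rows+1) x (2*cols+1)
--     where playable block positions occur at odd indices.
--     """
--     rows = len(grid_origin)
--     cols = len(grid_origin[0])
--     full_rows = 2 * rows + 1
--     full_cols = 2 * cols + 1
--     full_grid = []
--     for i in range(full_rows):
--         row = []
--         if i % 2 == 0:
--             row = ['x'] * full_cols
--         else:
--             original_row = grid_origin[(i - 1) // 2]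
--             for j in range(full_cols):
--                 if j % 2 == 0:
--                     row.append('x')
--                 else:
--                     row.append(original_row[(j - 1) // 2])
--         full_grid.append(row)
--     return full_grid
-- ===== SOURCE B (Python) =====
-- def generate_full_grid(grid_origin):
--     cols = len(grid_origin[0])
--     full_cols = 2 * cols + 1
--     full_grid = [['x'] * full_cols]
--     for original_row in grid_origin:
--         content = ['x']
--         for cell in original_row[:cols]:
--             content.append(cell)
--             content.append('x')
--         full_grid.append(content)
--         full_grid.append(['x'] * full_cols)
--     return full_grid
-- ===== Notes on version B (the rewrite author's own statement) =====
-- stated objective: simpler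
-- what changed: B iterates over grid_origin's rows directly, starting with one border row and interleaving fresh border rows with content rows built by appending cell,'x' pairs (taking the declared width's cells of each row) after a leading 'x', instead of A's loop over output indices with parity tests and (i-1)//2 back-index arithmetic.
import Mathlib
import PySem

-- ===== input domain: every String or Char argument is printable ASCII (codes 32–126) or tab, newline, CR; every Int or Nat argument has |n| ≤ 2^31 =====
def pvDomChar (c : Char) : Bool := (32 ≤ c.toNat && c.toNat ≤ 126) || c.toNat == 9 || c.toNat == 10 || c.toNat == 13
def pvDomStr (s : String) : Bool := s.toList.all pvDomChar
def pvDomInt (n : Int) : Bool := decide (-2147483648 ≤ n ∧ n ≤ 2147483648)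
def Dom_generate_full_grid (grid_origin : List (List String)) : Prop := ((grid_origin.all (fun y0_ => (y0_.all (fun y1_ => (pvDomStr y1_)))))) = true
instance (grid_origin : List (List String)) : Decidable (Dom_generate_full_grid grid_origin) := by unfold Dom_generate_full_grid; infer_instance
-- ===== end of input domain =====

-- B replaces A's loop over output indices (parity tests, (i-1)//2 back-indexing) by a direct
-- pass over grid_origin, interleaving fresh border rows with content rows built cell by cell (simpler).

-- ===== PORT A =====
-- literal transliteration of A; pyGetD is the total form of indexing, exact under Pre_ (indices in range)
def generate_full_grid (grid_origin : List (List String)) : List (List String) :=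
  let rows := PySem.List.len grid_origin
  let cols := PySem.List.len (PySem.List.pyGetD grid_origin 0 [])
  let fullRows := 2 * rows + 1
  let fullCols := 2 * cols + 1
  (PySem.List.pyRange 0 fullRows 1).foldl (fun full_grid i =>
    let row :=
      if PySem.Int.mod i 2 == 0 then
        List.replicate fullCols.toNat "x"
      else
        let original_row := PySem.List.pyGetD grid_origin (PySem.Int.floordiv (i - 1) 2) []
        (PySem.List.pyRange 0 fullCols 1).foldl (fun row j =>
          if PySem.Int.mod j 2 == 0 then row ++ ["x"]
          else row ++ [PySem.List.pyGetD original_row (PySem.Int.floordiv (j - 1) 2) ""]) []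
    full_grid ++ [row]) []

-- ===== PORT B =====
def generate_full_grid_alt (grid_origin : List (List String)) : List (List String) :=
  let cols := (PySem.List.pyGetD grid_origin 0 []).length
  let fullCols := 2 * cols + 1
  grid_origin.foldl (fun full_grid original_row =>
    let content := (original_row.take cols).foldl (fun c cell => c ++ [cell, "x"]) ["x"]
    full_grid ++ [content, List.replicate fullCols "x"])
    [List.replicate fullCols "x"]

-- ===== PRECONDITION & SPEC =====
-- A raises IndexError exactly on the empty grid and on grids with a row shorter than the first row
def Pre_generate_full_grid (grid_origin : List (List String)) : Prop :=
  grid_origin ≠ [] ∧ ∀ r ∈ grid_origin, (grid_origin.headD []).length ≤ r.length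
instance (grid_origin : List (List String)) : Decidable (Pre_generate_full_grid grid_origin) := by
  unfold Pre_generate_full_grid; infer_instance
def pvWitness_generate_full_grid : List (List String) := [["a", "b"], ["o", "x"]]

def Spec_generate_full_grid (grid_origin : List (List String)) (out : List (List String)) : Prop := out = generate_full_grid_alt grid_origin
instance (grid_origin : List (List String)) (out : List (List String)) : Decidable (Spec_generate_full_grid grid_origin out) := by unfold Spec_generate_full_grid; infer_instance

-- ===== CLAIM (what is proved, stated in full; the proofs are below) =====
def Claim_equal_generate_full_grid : Prop := ∀ (grid_origin : List (List String)), Dom_generate_full_grid grid_origin → Pre_generate_full_grid grid_origin → Spec_generate_full_grid grid_origin (generate_full_grid grid_origin)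

-- ===== LEMMAS AND PROOFS =====

-- the border row and a content row (first c cells), as closed shapes shared by both characterisations
def pvBorder (c : Nat) : List String := List.replicate (2 * c + 1) "x"
def pvContent (r : List String) : List String := "x" :: r.flatMap (fun s => [s, "x"])

-- B's closed form
theorem alt_closed (g : List (List String)) :
    generate_full_grid_alt g =
      pvBorder (g.headD []).length ::
        g.flatMap (fun r => [pvContent (r.take (g.headD []).length),
                             pvBorder (g.headD []).length]) := by
  unfold generate_full_grid_alt pvBorder pvContent
  dsimp only
  have h0 : PySem.List.pyGetD g 0 [] = g.headD [] := by
    cases g <;> simp [PySem.List.pyGetD_zero, List.getD]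
  rw [h0]
  refine Eq.trans (PySem.List.foldl_append_eq_flatMap
        (g := fun r => [(r.take (g.headD []).length).foldl (fun c cell => c ++ [cell, "x"]) ["x"],
                        List.replicate (2 * (g.headD []).length + 1) "x"])
        (acc := [List.replicate (2 * (g.headD []).length + 1) "x"]) (l := g)) ?_
  simp only [List.singleton_append]
  congr 1
  apply List.flatMap_congr
  intro r _
  refine congrArg (fun z => [z, List.replicate (2 * (g.headD []).length + 1) "x"]) ?_
  refine Eq.trans (PySem.List.foldl_append_eq_flatMap (g := fun cell => [cell, "x"])
        (acc := ["x"]) (l := r.take (g.headD []).length)) ?_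
  simp

-- A's inner loop, in Nat form
theorem inner_nat (r : List String) :
    (List.range (2 * r.length + 1)).map
      (fun k => if k % 2 = 0 then "x" else r.getD ((k - 1) / 2) "") = pvContent r := by
  induction r using List.reverseRecOn with
  | nil => decide
  | append_singleton r c ih =>
    have hlen : 2 * (r ++ [c]).length + 1 = (2 * r.length + 1) + 1 + 1 := by
      simp; omega
    rw [hlen, List.range_succ, List.range_succ, List.map_append, List.map_append]
    have hcongr : (List.range (2 * r.length + 1)).map
        (fun k => if k % 2 = 0 then "x" else (r ++ [c]).getD ((k - 1) / 2) "") =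
        (List.range (2 * r.length + 1)).map
        (fun k => if k % 2 = 0 then "x" else r.getD ((k - 1) / 2) "") := by
      apply List.map_congr_left
      intro k hk
      rw [List.mem_range] at hk
      by_cases hpar : k % 2 = 0
      · simp [hpar]
      · have hidx : (k - 1) / 2 < r.length := by omega
        simp only [hpar, List.getD, List.getElem?_append_left hidx]
    rw [hcongr, ih]
    have h1 : (2 * r.length + 1) % 2 = 1 := by omega
    have h2 : (2 * r.length + 1 + 1) % 2 = 0 := by omega
    simp [h1, h2, pvContent]

-- A's outer loop, in Nat form
theorem outer_nat (g : List (List String)) (c : Nat) :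
    (List.range (2 * g.length + 1)).map
      (fun k => if k % 2 = 0 then pvBorder c
                else pvContent ((g.getD ((k - 1) / 2) []).take c)) =
      pvBorder c :: g.flatMap (fun r => [pvContent (r.take c), pvBorder c]) := by
  induction g using List.reverseRecOn with
  | nil => simp
  | append_singleton g r ih =>
    have hlen : 2 * (g ++ [r]).length + 1 = (2 * g.length + 1) + 1 + 1 := by
      simp; omega
    rw [hlen, List.range_succ, List.range_succ, List.map_append, List.map_append]
    have hcongr : (List.range (2 * g.length + 1)).map
        (fun k => if k % 2 = 0 then pvBorder c
                  else pvContent (((g ++ [r]).getD ((k - 1) / 2) []).take c)) =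
        (List.range (2 * g.length + 1)).map
        (fun k => if k % 2 = 0 then pvBorder c
                  else pvContent ((g.getD ((k - 1) / 2) []).take c)) := by
      apply List.map_congr_left
      intro k hk
      rw [List.mem_range] at hk
      by_cases hpar : k % 2 = 0
      · simp [hpar]
      · have hidx : (k - 1) / 2 < g.length := by omega
        simp only [hpar, List.getD, List.getElem?_append_left hidx]
    rw [hcongr, ih]
    have h1 : (2 * g.length + 1) % 2 = 1 := by omega
    have h2 : (2 * g.length + 1 + 1) % 2 = 0 := by omega
    simp [h1, h2]

-- bridge: A's inner loop (Int indices over pyRange) equals pvContent of the first c cells,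
-- when the row has at least c cells (all indices in range)
theorem inner_bridge (r : List String) (c : Nat) (hlen : c ≤ r.length) :
    (PySem.List.pyRange 0 (2 * (c : Int) + 1) 1).foldl
      (fun row j => if PySem.Int.mod j 2 == 0 then row ++ ["x"]
        else row ++ [PySem.List.pyGetD r (PySem.Int.floordiv (j - 1) 2) ""]) [] =
      pvContent (r.take c) := by
  have hcast : 2 * (c : Int) + 1 = ((2 * c + 1 : Nat) : Int) := by push_cast; ring
  rw [hcast, PySem.List.pyRange_zero_natCast, List.foldl_map]
  have hbody : (fun (row : List String) (k : Nat) =>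
        if PySem.Int.mod (k : Int) 2 == 0 then row ++ ["x"]
        else row ++ [PySem.List.pyGetD r (PySem.Int.floordiv ((k : Int) - 1) 2) ""]) =
      (fun (row : List String) (k : Nat) => row ++ [if PySem.Int.mod (k : Int) 2 == 0 then "x"
        else PySem.List.pyGetD r (PySem.Int.floordiv ((k : Int) - 1) 2) ""]) := by
    funext row k
    by_cases h : (PySem.Int.mod (k : Int) 2 == 0) = true
    · rw [if_pos h, if_pos h]
    · rw [if_neg h, if_neg h]
  rw [hbody, PySem.List.foldl_append_singleton_eq_map, List.nil_append]
  have htake : 2 * c + 1 = 2 * (r.take c).length + 1 := by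
    rw [List.length_take_of_le hlen]
  rw [htake, ← inner_nat (r.take c)]
  apply List.map_congr_left
  intro k hk
  rw [List.mem_range] at hk
  have hmod : PySem.Int.mod (k : Int) 2 = ((k % 2 : Nat) : Int) := by
    exact_mod_cast PySem.Int.mod_natCast k 2
  by_cases hpar : k % 2 = 0
  · have hc : (PySem.Int.mod (k : Int) 2 == 0) = true := by rw [hmod, hpar]; rfl
    rw [if_pos hc, if_pos hpar]
  · have hp1 : k % 2 = 1 := by omega
    have hc : (PySem.Int.mod (k : Int) 2 == 0) = false := by rw [hmod, hp1]; rfl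
    have hsub : (k : Int) - 1 = ((k - 1 : Nat) : Int) := by
      have : 1 ≤ k := by omega
      push_cast [this]; ring
    have hdiv : PySem.Int.floordiv (((k - 1 : Nat) : Int)) 2 = (((k - 1) / 2 : Nat) : Int) := by
      exact_mod_cast PySem.Int.floordiv_natCast (k - 1) 2
    rw [if_neg (by rw [hc]; exact Bool.false_ne_true), if_neg hpar, hsub, hdiv,
        PySem.List.pyGetD_natCast]
    have hidx : (k - 1) / 2 < c := by
      rw [List.length_take_of_le hlen] at hk
      omega
    rw [List.getD, List.getD, List.getElem?_take_of_lt hidx]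

-- bridge: A's port equals the Nat-form outer map, given every row has at least the first row's length
theorem portA_closed (g : List (List String)) (hne : g ≠ [])
    (hall : ∀ r ∈ g, (g.headD []).length ≤ r.length) :
    generate_full_grid g =
      (List.range (2 * g.length + 1)).map
        (fun k => if k % 2 = 0 then pvBorder (g.headD []).length
                  else pvContent ((g.getD ((k - 1) / 2) []).take (g.headD []).length)) := by
  unfold generate_full_grid
  dsimp only
  have h0 : PySem.List.pyGetD g 0 [] = g.headD [] := by
    cases g <;> simp [PySem.List.pyGetD_zero, List.getD]
  rw [h0, PySem.List.len_eq, PySem.List.len_eq]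
  have hcast : 2 * (g.length : Int) + 1 = ((2 * g.length + 1 : Nat) : Int) := by push_cast; ring
  rw [hcast, PySem.List.pyRange_zero_natCast, List.foldl_map,
      PySem.List.foldl_append_singleton_eq_map, List.nil_append]
  apply List.map_congr_left
  intro k hk
  rw [List.mem_range] at hk
  have hmod : PySem.Int.mod (k : Int) 2 = ((k % 2 : Nat) : Int) := by
    exact_mod_cast PySem.Int.mod_natCast k 2
  by_cases hpar : k % 2 = 0
  · have hc : (PySem.Int.mod (k : Int) 2 == 0) = true := by rw [hmod, hpar]; rfl
    have htn : (2 * ((g.headD []).length : Int) + 1).toNat = 2 * (g.headD []).length + 1 := by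
      omega
    rw [if_pos hc, if_pos hpar, htn]
    rfl
  · have hp1 : k % 2 = 1 := by omega
    have hc : (PySem.Int.mod (k : Int) 2 == 0) = false := by rw [hmod, hp1]; rfl
    have hsub : (k : Int) - 1 = ((k - 1 : Nat) : Int) := by
      have : 1 ≤ k := by omega
      push_cast [this]; ring
    have hdiv : PySem.Int.floordiv (((k - 1 : Nat) : Int)) 2 = (((k - 1) / 2 : Nat) : Int) := by
      exact_mod_cast PySem.Int.floordiv_natCast (k - 1) 2
    have hidx : (k - 1) / 2 < g.length := by omega
    have horow : PySem.List.pyGetD g (((k - 1) / 2 : Nat) : Int) [] = g.getD ((k - 1) / 2) [] :=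
      PySem.List.pyGetD_natCast g _ []
    have hmem : g.getD ((k - 1) / 2) [] ∈ g := by
      rw [List.getD_eq_getElem g [] hidx]
      exact List.getElem_mem hidx
    have hlenr : (g.headD []).length ≤ (g.getD ((k - 1) / 2) []).length := hall _ hmem
    rw [if_neg (by rw [hc]; exact Bool.false_ne_true), if_neg hpar, hsub, hdiv, horow]
    exact inner_bridge _ _ hlenr

theorem generate_full_grid_spec : Claim_equal_generate_full_grid := by
  intro g _ hpre
  obtain ⟨hne, hall⟩ := hpre
  unfold Spec_generate_full_grid
  rw [alt_closed, portA_closed g hne hall, outer_nat g _]
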